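-- pv_equiv track=rewrite | github.com/aymeric75/latplanDatasetGen | genHanoi.py | generate_all_possible_states_hanoi
-- ===== SOURCE A (Python) =====
-- def generate_all_possible_states_hanoi(nb_towers):
--     all_configs = []
--     # disk1 position
--     for d1 in range(nb_towers):
--         # disk2 position
--         for d2 in range(nb_towers):
--             # disk3 position
--             for d3 in range(nb_towers):
--                 # disk3 position
--                 for d4 in range(nb_towers):
--                     oneconfig = [d1, d2, d3, d4]
--                     all_configs.append(oneconfig)
--     return all_configs
-- ===== SOURCE B (Python) =====
-- def generate_all_possible_states_hanoi(nb_towers):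
--     configs = [[]]
--     for _ in range(4):
--         configs = [c + [d] for c in configs for d in range(nb_towers)]
--     return configs
-- ===== Notes on version B (the rewrite author's own statement) =====
-- stated objective: simpler
-- what changed: Replaced the four hand-written nested loops with a fold that extends every partial configuration by each tower index, once per disk.
import Mathlib
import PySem

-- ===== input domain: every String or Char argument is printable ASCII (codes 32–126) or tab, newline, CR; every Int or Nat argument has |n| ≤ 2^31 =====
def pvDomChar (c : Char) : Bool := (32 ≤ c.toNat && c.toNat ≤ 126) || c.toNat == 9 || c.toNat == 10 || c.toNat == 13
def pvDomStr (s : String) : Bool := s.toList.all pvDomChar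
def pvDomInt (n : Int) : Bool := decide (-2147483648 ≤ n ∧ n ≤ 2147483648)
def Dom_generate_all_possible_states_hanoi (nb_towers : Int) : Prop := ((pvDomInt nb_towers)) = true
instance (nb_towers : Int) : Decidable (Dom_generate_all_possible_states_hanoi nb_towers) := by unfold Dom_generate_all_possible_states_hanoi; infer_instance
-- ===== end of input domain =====

-- ===== PORT A =====
-- B replaces A's four nested loops with one fold extending partial configurations; same order, same values.
def generate_all_possible_states_hanoi (nb_towers : Int) : List (List Int) :=
  (PySem.List.pyRange 0 nb_towers 1).foldl (fun acc d1 =>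
    (PySem.List.pyRange 0 nb_towers 1).foldl (fun acc d2 =>
      (PySem.List.pyRange 0 nb_towers 1).foldl (fun acc d3 =>
        (PySem.List.pyRange 0 nb_towers 1).foldl (fun acc d4 =>
          acc ++ [[d1, d2, d3, d4]]) acc) acc) acc) []

-- ===== PORT B =====
def hanoiExtend (nb_towers : Int) (configs : List (List Int)) : List (List Int) :=
  configs.flatMap (fun c => (PySem.List.pyRange 0 nb_towers 1).map (fun d => c ++ [d]))

def generate_all_possible_states_hanoi_alt (nb_towers : Int) : List (List Int) :=
  (PySem.List.pyRange 0 4 1).foldl (fun configs _ => hanoiExtend nb_towers configs) [[]]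

-- ===== PRECONDITION & SPEC =====
def Spec_generate_all_possible_states_hanoi (nb_towers : Int) (out : List (List Int)) : Prop := out = generate_all_possible_states_hanoi_alt nb_towers
instance (nb_towers : Int) (out : List (List Int)) : Decidable (Spec_generate_all_possible_states_hanoi nb_towers out) := by unfold Spec_generate_all_possible_states_hanoi; infer_instance

-- ===== CLAIM (what is proved, stated in full; the proofs are below) =====
def Claim_equal_generate_all_possible_states_hanoi : Prop := ∀ (nb_towers : Int), Dom_generate_all_possible_states_hanoi nb_towers → Spec_generate_all_possible_states_hanoi nb_towers (generate_all_possible_states_hanoi nb_towers)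

-- ===== LEMMAS AND PROOFS =====

-- ===== VERDICT (by name: the statement is the Claim_ definition above) =====
lemma pyRange_four : PySem.List.pyRange 0 4 1 = [0, 1, 2, 3] := by decide

theorem generate_all_possible_states_hanoi_spec : Claim_equal_generate_all_possible_states_hanoi := by
  intro n _
  unfold Spec_generate_all_possible_states_hanoi
  unfold generate_all_possible_states_hanoi generate_all_possible_states_hanoi_alt
  rw [pyRange_four]
  simp only [List.foldl_cons, List.foldl_nil, hanoiExtend,
    PySem.List.foldl_append_singleton_eq_map, PySem.List.foldl_append_eq_flatMap,
    List.flatMap_cons, List.flatMap_nil, List.flatMap_map, List.flatMap_assoc,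
    List.nil_append, List.append_nil, List.cons_append]
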